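-- pv_equiv track=rewrite | github.com/Pologue/robocasa | robocasa/scripts/dataset_scripts/extract_affordance_gt.py | stabilize_focus_sequence
-- ===== SOURCE A (Python) =====
-- def stabilize_focus_sequence(names, min_persist):
--     """Temporal smoothing: drop short-lived switches."""
--     if len(names) == 0:
--         return names
--
--     out = list(names)
--     i = 0
--     while i < len(out):
--         j = i + 1
--         while j < len(out) and out[j] == out[i]:
--             j += 1
--         run_len = j - i
--         if run_len < min_persist:
--             prev_name = out[i - 1] if i > 0 else None
--             next_name = out[j] if j < len(out) else None
--             fill_name = prev_name if prev_name is not None else next_name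
--             if fill_name is not None:
--                 for k in range(i, j):
--                     out[k] = fill_name
--         i = j
--     return out
-- ===== SOURCE B (Python) =====
-- def stabilize_focus_sequence(names, min_persist):
--     """Temporal smoothing via an explicit run decomposition: one scan builds
--     the runs of equal consecutive names, one scan over the runs emits either
--     the run's own value or the fill (previous effective value, else the next
--     run's value) repeated run-length times."""
--     if len(names) == 0:
--         return names
--     runs = []
--     start = 0
--     for idx in range(1, len(names) + 1):
--         if idx == len(names) or names[idx] != names[start]:
--             runs.append((names[start], idx - start))
--             start = idx
--     nexts = [r[0] for r in runs[1:]] + [None]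
--     out = []
--     prev_eff = None
--     for (value, length), next_value in zip(runs, nexts):
--         fill = prev_eff if prev_eff is not None else next_value
--         if length < min_persist and fill is not None:
--             out.extend([fill] * length)
--             prev_eff = fill
--         else:
--             out.extend([value] * length)
--             prev_eff = value
--     return out
-- ===== Notes on version B (the rewrite author's own statement) =====
-- stated objective: alternative
-- what changed: B replaces A's in-place scan-and-mutate loop (which rescans the working list to find each run and overwrites slices) by an explicit two-pass run decomposition: one pass builds the list of (value, length) runs of the original names, a second pass over the runs emits each segment either as its own value or as the fill value (previous effective value, else next run's value).
import Mathlib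
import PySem

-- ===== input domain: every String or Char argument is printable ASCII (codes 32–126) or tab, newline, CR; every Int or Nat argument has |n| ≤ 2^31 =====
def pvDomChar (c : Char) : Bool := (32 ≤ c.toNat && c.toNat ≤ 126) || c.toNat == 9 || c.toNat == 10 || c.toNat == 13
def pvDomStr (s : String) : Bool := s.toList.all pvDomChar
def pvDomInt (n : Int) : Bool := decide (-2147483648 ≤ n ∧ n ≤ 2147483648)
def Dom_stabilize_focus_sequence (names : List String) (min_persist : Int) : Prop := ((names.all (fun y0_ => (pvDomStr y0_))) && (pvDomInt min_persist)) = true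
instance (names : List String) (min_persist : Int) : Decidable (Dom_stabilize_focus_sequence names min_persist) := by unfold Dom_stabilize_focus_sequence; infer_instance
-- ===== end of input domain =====

-- B re-implements the smoothing as an explicit run decomposition (one pass building
-- maximal runs, one pass over the runs emitting filled/kept segments) instead of A's
-- in-place index scan with mutation; same cost, alternative decomposition.

-- ===== PORT A =====

-- inner `while j < len(out) and out[j] == out[i]: j += 1`
def pvFindRunEnd (out : List String) (i j : Nat) : Nat :=
  if h : j < out.length ∧ out[j]! = out[i]! then pvFindRunEnd out i (j + 1) else j
termination_by out.length - j
decreasing_by omega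

-- cited by pvLoopA's termination proof
theorem pvFindRunEnd_ge (out : List String) (i : Nat) : ∀ j, j ≤ pvFindRunEnd out i j := by
  intro j
  induction j using pvFindRunEnd.induct out i with
  | case1 j h ih => rw [pvFindRunEnd, dif_pos h]; omega
  | case2 j h => rw [pvFindRunEnd, dif_neg h]

-- `for k in range(i, j): out[k] = fill_name`
def pvFill (out : List String) (i j : Nat) (f : String) : List String :=
  (List.range' i (j - i)).foldl (fun acc k => acc.set k f) out

-- cited by pvLoopA's termination proof
theorem pvFill_length (out : List String) (i j : Nat) (f : String) :
    (pvFill out i j f).length = out.length := by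
  unfold pvFill
  generalize List.range' i (j - i) = l
  induction l generalizing out with
  | nil => rfl
  | cons a t ih => simp [List.foldl, ih]

-- outer `while i < len(out): …`
def pvLoopA (min_persist : Int) (out : List String) (i : Nat) : List String :=
  if h : i < out.length then
    let j := pvFindRunEnd out i (i + 1)
    let out' :=
      if (j : Int) - (i : Int) < min_persist then
        let prev : Option String := if 0 < i then some out[i - 1]! else none
        let next : Option String := if j < out.length then some out[j]! else none
        let fill := if prev.isSome then prev else next
        match fill with
        | some f => pvFill out i j f
        | none => out
      else out
    pvLoopA min_persist out' j
  else out
termination_by out.length - i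
decreasing_by
  all_goals
    have h1 := pvFindRunEnd_ge out i (i + 1)
    first
      | omega
      | (split
         · split
           · simp only [pvFill_length]; omega
           · omega
         · omega)

def stabilize_focus_sequence (names : List String) (min_persist : Int) : List String :=
  if names.length = 0 then names
  else pvLoopA min_persist names 0

-- ===== PORT B =====

-- `for idx in range(1, len(names)+1): if idx == len(names) or names[idx] != names[start]: runs.append(...); start = idx`
def pvRunsLoop (names : List String) (start idx : Nat) (acc : List (String × Nat)) :
    List (String × Nat) :=
  if idx ≤ names.length then
    if idx = names.length ∨ names[idx]! ≠ names[start]! then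
      pvRunsLoop names idx (idx + 1) (acc ++ [(names[start]!, idx - start)])
    else
      pvRunsLoop names start (idx + 1) acc
  else acc
termination_by names.length + 1 - idx
decreasing_by all_goals omega

def pvRuns (names : List String) : List (String × Nat) := pvRunsLoop names 0 1 []

-- the body of `for (value, length), next_value in zip(runs, nexts): …`
def pvSecondStep (min_persist : Int) (st : List String × Option String)
    (p : (String × Nat) × Option String) : List String × Option String :=
  let value := p.1.1
  let length := p.1.2
  let next_value := p.2
  let fill := if st.2.isSome then st.2 else next_value
  if (length : Int) < min_persist then
    match fill with
    | some f => (st.1 ++ List.replicate length f, some f)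
    | none => (st.1 ++ List.replicate length value, some value)
  else (st.1 ++ List.replicate length value, some value)

-- `nexts = [r[0] for r in runs[1:]] + [None]` then the zip/fold with (out, prev_eff)
def pvSecondPass (min_persist : Int) (runs : List (String × Nat)) : List String :=
  let nexts := (runs.drop 1).map (fun r => some r.1) ++ [none]
  ((runs.zip nexts).foldl (pvSecondStep min_persist) ([], none)).1

def stabilize_focus_sequence_alt (names : List String) (min_persist : Int) : List String :=
  if names.length = 0 then names
  else pvSecondPass min_persist (pvRuns names)

-- ===== PRECONDITION & SPEC =====
def Spec_stabilize_focus_sequence (names : List String) (min_persist : Int) (out : List String) : Prop := out = stabilize_focus_sequence_alt names min_persist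
instance (names : List String) (min_persist : Int) (out : List String) : Decidable (Spec_stabilize_focus_sequence names min_persist out) := by unfold Spec_stabilize_focus_sequence; infer_instance

-- ===== CLAIM (what is proved, stated in full; the proofs are below) =====
def Claim_equal_stabilize_focus_sequence : Prop := ∀ (names : List String) (min_persist : Int), Dom_stabilize_focus_sequence names min_persist → Spec_stabilize_focus_sequence names min_persist (stabilize_focus_sequence names min_persist)

-- ===== LEMMAS AND PROOFS =====

-- run decomposition of `names` starting at position i (proof-side reference shape)
def runsFrom (names : List String) (i : Nat) : List (String × Nat) :=
  if h : i < names.length then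
    (names[i]!, pvFindRunEnd names i (i + 1) - i) :: runsFrom names (pvFindRunEnd names i (i + 1))
  else []
termination_by names.length - i
decreasing_by
  have := pvFindRunEnd_ge names i (i + 1)
  omega

-- recursive reference shape of B's second pass
def fillRuns (min_persist : Int) : List (String × Nat) → Option String → List String
  | [], _ => []
  | (v, len) :: rest, prev =>
    let next := rest.head?.map Prod.fst
    let fill := if prev.isSome then prev else next
    if (len : Int) < min_persist then
      match fill with
      | some f => List.replicate len f ++ fillRuns min_persist rest (some f)
      | none => List.replicate len v ++ fillRuns min_persist rest (some v)
    else List.replicate len v ++ fillRuns min_persist rest (some v)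

-- ---- pvFindRunEnd characterizations ----

theorem pvFindRunEnd_pos (out : List String) (i j : Nat)
    (h : j < out.length ∧ out[j]! = out[i]!) :
    pvFindRunEnd out i j = pvFindRunEnd out i (j + 1) := by
  conv_lhs => rw [pvFindRunEnd]
  rw [dif_pos h]

theorem pvFindRunEnd_neg (out : List String) (i j : Nat)
    (h : ¬(j < out.length ∧ out[j]! = out[i]!)) :
    pvFindRunEnd out i j = j := by
  conv_lhs => rw [pvFindRunEnd]
  rw [dif_neg h]

theorem pvFindRunEnd_le (out : List String) (i : Nat) :
    ∀ j, j ≤ out.length → pvFindRunEnd out i j ≤ out.length := by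
  intro j
  induction j using pvFindRunEnd.induct out i with
  | case1 j h ih => rw [pvFindRunEnd, dif_pos h]; exact fun _ => ih (by omega)
  | case2 j h => rw [pvFindRunEnd, dif_neg h]; exact id

theorem pvFindRunEnd_const (out : List String) (i : Nat) :
    ∀ j k, j ≤ k → k < pvFindRunEnd out i j → out[k]! = out[i]! := by
  intro j
  induction j using pvFindRunEnd.induct out i with
  | case1 j h ih =>
    intro k hjk hk
    rw [pvFindRunEnd, dif_pos h] at hk
    rcases Nat.eq_or_lt_of_le hjk with rfl | hlt
    · exact h.2
    · exact ih k hlt hk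
  | case2 j h =>
    intro k hjk hk
    rw [pvFindRunEnd, dif_neg h] at hk
    omega

theorem pvFindRunEnd_boundary (out : List String) (i : Nat) :
    ∀ j, j ≤ out.length →
      (pvFindRunEnd out i j = out.length ∨ out[pvFindRunEnd out i j]! ≠ out[i]!) := by
  intro j
  induction j using pvFindRunEnd.induct out i with
  | case1 j h ih =>
    intro _
    rw [pvFindRunEnd, dif_pos h]
    exact ih (by omega)
  | case2 j h =>
    intro hj
    rw [pvFindRunEnd, dif_neg h]
    by_cases hl : j < out.length
    · right; intro he; exact h ⟨hl, he⟩
    · left; omega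

theorem pvFindRunEnd_congr (a b : List String) (i : Nat) (hlen : a.length = b.length)
    (hag : ∀ k, i ≤ k → a[k]! = b[k]!) :
    ∀ j, i ≤ j → pvFindRunEnd a i j = pvFindRunEnd b i j := by
  intro j
  induction j using pvFindRunEnd.induct a i with
  | case1 j h ih =>
    intro hij
    have hb : j < b.length ∧ b[j]! = b[i]! := by
      refine ⟨hlen ▸ h.1, ?_⟩
      rw [← hag j hij, ← hag i le_rfl]; exact h.2
    rw [pvFindRunEnd_pos a i j h, pvFindRunEnd_pos b i j hb]
    exact ih (by omega)
  | case2 j h =>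
    intro hij
    have hb : ¬(j < b.length ∧ b[j]! = b[i]!) := by
      intro hc
      exact h ⟨hlen ▸ hc.1, by rw [hag j hij, hag i le_rfl]; exact hc.2⟩
    rw [pvFindRunEnd_neg a i j h, pvFindRunEnd_neg b i j hb]

theorem pvFindRunEnd_eq (out : List String) (i : Nat) :
    ∀ m j, m ≤ j → j ≤ out.length →
      (∀ k, m ≤ k → k < j → out[k]! = out[i]!) →
      (j = out.length ∨ out[j]! ≠ out[i]!) →
      pvFindRunEnd out i m = j := by
  intro m j hmj hjl hconst hbound
  induction hd : j - m generalizing m with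
  | zero =>
    have : m = j := by omega
    subst this
    have hneg : ¬(m < out.length ∧ out[m]! = out[i]!) := by
      rcases hbound with h | h
      · omega
      · intro hc; exact h hc.2
    rw [pvFindRunEnd, dif_neg hneg]
  | succ n ih =>
    have hm : m < j := by omega
    have hpos : m < out.length ∧ out[m]! = out[i]! :=
      ⟨by omega, hconst m le_rfl hm⟩
    rw [pvFindRunEnd, dif_pos hpos]
    exact ih (m + 1) (by omega) (fun k hk1 hk2 => hconst k (by omega) hk2) (by omega)

-- ---- list-index helpers ----

theorem getElem_bang_append_right (P l : List String) (k : Nat) (h : P.length ≤ k) :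
    (P ++ l)[k]! = l[k - P.length]! := by
  simp [List.getElem!_eq_getElem?_getD, List.getElem?_append_right h]

theorem getElem_bang_append_left (P l : List String) (k : Nat) (h : k < P.length) :
    (P ++ l)[k]! = P[k]! := by
  simp [List.getElem!_eq_getElem?_getD, List.getElem?_append_left h]

theorem getElem_bang_drop (names : List String) (i n : Nat) :
    (names.drop i)[n]! = names[i + n]! := by
  simp [List.getElem!_eq_getElem?_getD, List.getElem?_drop]

-- agreement of A's working list with names on positions ≥ i
theorem out_agree (names P : List String) (i : Nat) (hP : P.length = i) :
    ∀ k, i ≤ k → (P ++ names.drop i)[k]! = names[k]! := by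
  intro k hk
  rw [getElem_bang_append_right _ _ _ (by omega), hP, getElem_bang_drop]
  congr 1
  omega

theorem drop_decomp (names : List String) (v : String) :
    ∀ e i, i ≤ e → e ≤ names.length → (∀ k, i ≤ k → k < e → names[k]! = v) →
      names.drop i = List.replicate (e - i) v ++ names.drop e := by
  intro e i hie hel hconst
  induction hd : e - i generalizing i with
  | zero =>
    have : i = e := by omega
    subst this; simp
  | succ n ih =>
    have hi : i < names.length := by omega
    rw [List.drop_eq_getElem_cons hi]
    have h1 : names[i] = v := by
      rw [← hconst i le_rfl (by omega)]
      simp [List.getElem!_eq_getElem?_getD, List.getElem?_eq_getElem hi]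
    have h2 := ih (i + 1) (by omega) (fun k hk1 hk2 => hconst k (by omega) hk2) (by omega)
    rw [h1, h2]
    simp [List.replicate_succ]

theorem pvFill_spec (f : String) :
    ∀ n i (out : List String), i + n ≤ out.length →
      (List.range' i n).foldl (fun acc k => acc.set k f) out =
        out.take i ++ List.replicate n f ++ out.drop (i + n) := by
  intro n
  induction n with
  | zero => intro i out _; simp
  | succ n ih =>
    intro i out hlen
    rw [List.range'_succ, List.foldl_cons]
    have hi : i < out.length := by omega
    have hset : out.set i f = out.take i ++ f :: out.drop (i + 1) :=
      List.set_eq_take_cons_drop f hi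
    rw [ih (i + 1) (out.set i f) (by simp; omega), hset]
    have hlen_take : (out.take i).length = i := by simp; omega
    have htk : (out.take i ++ f :: out.drop (i + 1)).take (i + 1) = out.take i ++ [f] := by
      rw [List.take_append, List.take_of_length_le (by omega), hlen_take]
      congr 1
      have : i + 1 - i = 1 := by omega
      rw [this]
      rfl
    have hdr : (out.take i ++ f :: out.drop (i + 1)).drop (i + 1 + n) = out.drop (i + 1 + n) := by
      rw [List.drop_append, hlen_take]
      have h1 : (out.take i).drop (i + 1 + n) = [] := by
        apply List.drop_eq_nil_of_le; omega
      have h2 : i + 1 + n - i = n + 1 := by omega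
      rw [h1, h2]
      simp [List.drop_drop]
    rw [htk, hdr]
    have hrep : List.replicate (n + 1) f = [f] ++ List.replicate n f := by
      simp [List.replicate_succ]
    rw [hrep]
    have hidx : i + (n + 1) = i + 1 + n := by omega
    rw [hidx]
    simp [List.append_assoc]

theorem getLast_append_replicate (P : List String) (n : Nat) (v : String) (h : 0 < n) :
    (P ++ List.replicate n v).getLast? = some v := by
  cases n with
  | zero => omega
  | succ n =>
    rw [List.getLast?_append]
    have : (List.replicate (n + 1) v).getLast? = some v := by
      rw [List.getLast?_eq_getElem?]
      simp
    simp [this]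

-- prev_name in A equals P.getLast? when the prefix P has been written
theorem prev_eq (names P : List String) (i : Nat) (hP : P.length = i) :
    (if 0 < i then some (P ++ names.drop i)[i - 1]! else none) = P.getLast? := by
  by_cases hi : 0 < i
  · rw [if_pos hi, getElem_bang_append_left _ _ _ (by omega)]
    rw [List.getLast?_eq_getElem?]
    have hlt : i - 1 < P.length := by omega
    simp [List.getElem!_eq_getElem?_getD, hP, List.getElem?_eq_getElem hlt]
  · rw [if_neg hi]
    have : P = [] := by
      cases P with
      | nil => rfl
      | cons a t => simp at hP; omega
    simp [this]

-- ---- B bridge: pvSecondPass = fillRuns ----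

theorem secondPass_foldl (m : Int) :
    ∀ (runs : List (String × Nat)) (out0 : List String) (prev : Option String),
      ((runs.zip ((runs.drop 1).map (fun r => some r.1) ++ [none])).foldl
          (pvSecondStep m) (out0, prev)).1 = out0 ++ fillRuns m runs prev := by
  intro runs
  induction runs with
  | nil => intro out0 prev; simp [fillRuns]
  | cons hd rest ih =>
    intro out0 prev
    obtain ⟨v, len⟩ := hd
    have hzip : (((v, len) :: rest).zip (((((v, len) :: rest).drop 1).map
          (fun r => some r.1)) ++ [none])) =
        ((v, len), rest.head?.map Prod.fst) ::
          (rest.zip ((rest.drop 1).map (fun r => some r.1) ++ [none])) := by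
      cases rest <;> simp
    rw [hzip, List.foldl_cons]
    by_cases hm : (len : Int) < m
    · cases prev with
      | some pv =>
        simp only [pvSecondStep, fillRuns, Option.isSome_some, if_true, if_pos hm]
        rw [ih]
        simp [List.append_assoc]
      | none =>
        cases hh : rest.head?.map Prod.fst with
        | some f =>
          simp only [pvSecondStep, fillRuns, hh, Option.isSome_none, Bool.false_eq_true,
            if_false, if_pos hm]
          rw [ih]
          simp [List.append_assoc]
        | none =>
          simp only [pvSecondStep, fillRuns, hh, Option.isSome_none, Bool.false_eq_true,
            if_false, if_pos hm]
          rw [ih]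
          simp [List.append_assoc]
    · cases prev with
      | some pv =>
        simp only [pvSecondStep, fillRuns, Option.isSome_some, if_true, if_neg hm]
        rw [ih]
        simp [List.append_assoc]
      | none =>
        simp only [pvSecondStep, fillRuns, Option.isSome_none, Bool.false_eq_true,
          if_false, if_neg hm]
        rw [ih]
        simp [List.append_assoc]

theorem secondPass_eq (m : Int) (runs : List (String × Nat)) :
    pvSecondPass m runs = fillRuns m runs none := by
  unfold pvSecondPass
  have := secondPass_foldl m runs [] none
  simpa using this

-- ---- runs bridge: pvRuns = runsFrom 0 ----

theorem runsLoop_eq (names : List String) :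
    ∀ fuel idx start acc, names.length + 1 - idx ≤ fuel →
      start < names.length → start < idx → idx ≤ names.length →
      (∀ k, start ≤ k → k < idx → names[k]! = names[start]!) →
      pvRunsLoop names start idx acc = acc ++ runsFrom names start := by
  intro fuel
  induction fuel with
  | zero => intro idx start acc h1 _ _ h4 _; omega
  | succ fuel ih =>
    intro idx start acc hfuel hs hsi hil hconst
    rw [pvRunsLoop, if_pos hil]
    by_cases hb : idx = names.length ∨ names[idx]! ≠ names[start]!
    · rw [if_pos hb]
      have he : pvFindRunEnd names start (start + 1) = idx :=
        pvFindRunEnd_eq names start (start + 1) idx (by omega) hil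
          (fun k hk1 hk2 => hconst k (by omega) hk2) hb
      rw [runsFrom, dif_pos hs, he]
      by_cases hend : idx = names.length
      · rw [pvRunsLoop, if_neg (by omega)]
        rw [runsFrom, dif_neg (by omega)]
      · have hlt : idx < names.length := by omega
        have hconst' : ∀ k, idx ≤ k → k < idx + 1 → names[k]! = names[idx]! := by
          intro k hk1 hk2
          have hke : k = idx := by omega
          rw [hke]
        rw [ih (idx + 1) idx (acc ++ [(names[start]!, idx - start)]) (by omega) hlt
          (by omega) (by omega) hconst']
        simp
    · rw [if_neg hb]
      have hb1 : ¬idx = names.length ∧ ¬names[idx]! ≠ names[start]! := not_or.mp hb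
      have hb2 : names[idx]! = names[start]! := not_not.mp hb1.2
      exact ih (idx + 1) start acc (by omega) hs (by omega) (by omega)
        (fun k hk1 hk2 => by
          by_cases hk : k = idx
          · rw [hk]; exact hb2
          · exact hconst k hk1 (by omega))

theorem runs_eq (names : List String) (h : 0 < names.length) :
    pvRuns names = runsFrom names 0 := by
  unfold pvRuns
  have hc0 : ∀ k, 0 ≤ k → k < 1 → names[k]! = names[0]! := by
    intro k hk1 hk2
    have hke : k = 0 := by omega
    rw [hke]
  have := runsLoop_eq names (names.length + 1) 1 0 [] (by omega) h (by omega) h hc0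
  simpa using this

-- ---- main: A's loop equals fillRuns over runsFrom ----

theorem loopA_eq (names : List String) (m : Int) :
    ∀ fuel i P, names.length - i ≤ fuel → i ≤ names.length → P.length = i →
      pvLoopA m (P ++ names.drop i) i = P ++ fillRuns m (runsFrom names i) P.getLast? := by
  intro fuel
  induction fuel with
  | zero =>
    intro i P hfuel hi hP
    have : i = names.length := by omega
    subst this
    rw [pvLoopA, dif_neg (by simp; omega)]
    rw [runsFrom, dif_neg (by omega)]
    simp [fillRuns]
  | succ fuel ih =>
    intro i P hfuel hi hP
    by_cases hend : i = names.length
    · subst hend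
      rw [pvLoopA, dif_neg (by simp; omega)]
      rw [runsFrom, dif_neg (by omega)]
      simp [fillRuns]
    · have hil : i < names.length := by omega
      set out := P ++ names.drop i with hout
      have holen : out.length = names.length := by simp [hout, hP]; omega
      have hag : ∀ k, i ≤ k → out[k]! = names[k]! := out_agree names P i hP
      rw [pvLoopA, dif_pos (by omega)]
      have hje : pvFindRunEnd out i (i + 1) = pvFindRunEnd names i (i + 1) :=
        pvFindRunEnd_congr out names i holen hag (i + 1) (by omega)
      set e := pvFindRunEnd names i (i + 1) with hedef
      have hei : i + 1 ≤ e := pvFindRunEnd_ge names i (i + 1)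
      have hel : e ≤ names.length := pvFindRunEnd_le names i (i + 1) (by omega)
      have hconst : ∀ k, i ≤ k → k < e → names[k]! = names[i]! := by
        intro k hk1 hk2
        rcases Nat.eq_or_lt_of_le hk1 with rfl | hlt
        · rfl
        · exact pvFindRunEnd_const names i (i + 1) k hlt hk2
      have hbound : e = names.length ∨ names[e]! ≠ names[i]! :=
        pvFindRunEnd_boundary names i (i + 1) (by omega)
      -- unfold runsFrom and fillRuns on the RHS
      rw [runsFrom, dif_pos hil, ← hedef]
      have hnexts : (runsFrom names e).head?.map Prod.fst =
          (if e < names.length then some names[e]! else none) := by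
        by_cases hee : e < names.length
        · rw [runsFrom, dif_pos hee]; simp [hee]
        · rw [runsFrom, dif_neg hee]; simp [hee]
      have hprev : (if 0 < i then some out[i - 1]! else none) = P.getLast? :=
        prev_eq names P i hP
      have hnextA : (if pvFindRunEnd out i (i + 1) < out.length then
            some out[pvFindRunEnd out i (i + 1)]! else none) =
          (if e < names.length then some names[e]! else none) := by
        rw [hje, holen]
        by_cases hee : e < names.length
        · rw [if_pos hee, if_pos hee, hag e (by omega)]
        · rw [if_neg hee, if_neg hee]
      have hcast : ((pvFindRunEnd out i (i + 1) : Int) - (i : Int) < m) ↔ (((e - i : Nat) : Int) < m) := by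
        rw [hje]; omega
      simp only [fillRuns, hnexts]
      -- case split on the fill condition
      by_cases hlt : ((e - i : Nat) : Int) < m
      · rw [if_pos hlt]
        have hltA : (pvFindRunEnd out i (i + 1) : Int) - (i : Int) < m := hcast.mpr hlt
        rw [if_pos hltA, hprev, hnextA]
        cases hf : (if P.getLast?.isSome then P.getLast? else
            (if e < names.length then some names[e]! else none)) with
        | some f =>
          show pvLoopA m (pvFill out i (pvFindRunEnd out i (i + 1)) f)
              (pvFindRunEnd out i (i + 1)) =
            P ++ (List.replicate (e - i) f ++ fillRuns m (runsFrom names e) (some f))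
          rw [hje]
          have hfill : pvFill out i e f = P ++ List.replicate (e - i) f ++ names.drop e := by
            unfold pvFill
            rw [pvFill_spec f (e - i) i out (by omega)]
            have htake : out.take i = P := by rw [hout]; exact List.take_left' hP
            have hie2 : i + (e - i) = e := by omega
            have hdropo : out.drop (i + (e - i)) = names.drop e := by
              rw [hie2, hout, List.drop_append, List.drop_eq_nil_of_le (by omega),
                List.drop_drop, hP, hie2]
              simp only [List.nil_append]
            rw [htake, hdropo]
          rw [hfill, ← List.append_assoc]
          have hrec := ih e (P ++ List.replicate (e - i) f) (by omega) hel
            (by rw [List.length_append, List.length_replicate, hP]; omega)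
          rw [hrec, getLast_append_replicate P (e - i) f (by omega)]
        | none =>
          show pvLoopA m out (pvFindRunEnd out i (i + 1)) =
            P ++ (List.replicate (e - i) names[i]! ++
              fillRuns m (runsFrom names e) (some names[i]!))
          rw [hje]
          have hdecomp : names.drop i = List.replicate (e - i) names[i]! ++ names.drop e :=
            drop_decomp names names[i]! e i (by omega) hel hconst
          have hout' : out = (P ++ List.replicate (e - i) names[i]!) ++ names.drop e := by
            rw [hout, hdecomp, List.append_assoc]
          rw [hout']
          have hrec := ih e (P ++ List.replicate (e - i) names[i]!) (by omega) hel
            (by rw [List.length_append, List.length_replicate, hP]; omega)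
          rw [hrec, getLast_append_replicate P (e - i) names[i]! (by omega)]
          simp [List.append_assoc]
      · rw [if_neg hlt]
        have hltA : ¬((pvFindRunEnd out i (i + 1) : Int) - (i : Int) < m) :=
          fun hc => hlt (hcast.mp hc)
        rw [if_neg hltA, hje]
        have hdecomp : names.drop i = List.replicate (e - i) names[i]! ++ names.drop e :=
          drop_decomp names names[i]! e i (by omega) hel hconst
        have hout' : out = (P ++ List.replicate (e - i) names[i]!) ++ names.drop e := by
          rw [hout, hdecomp, List.append_assoc]
        rw [hout']
        have hrec := ih e (P ++ List.replicate (e - i) names[i]!) (by omega) hel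
          (by rw [List.length_append, List.length_replicate, hP]; omega)
        rw [hrec, getLast_append_replicate P (e - i) names[i]! (by omega)]
        simp [List.append_assoc]

-- ===== VERDICT (by name: the statement is the Claim_ definition above) =====
theorem stabilize_focus_sequence_spec : Claim_equal_stabilize_focus_sequence := by
  intro names min_persist _
  unfold Spec_stabilize_focus_sequence stabilize_focus_sequence stabilize_focus_sequence_alt
  by_cases h : names.length = 0
  · rw [if_pos h, if_pos h]
  · rw [if_neg h, if_neg h]
    have hmain := loopA_eq names min_persist names.length 0 [] (by omega) (by omega) rfl
    simp only [List.nil_append, List.drop_zero, List.getLast?_nil] at hmain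
    rw [hmain, runs_eq names (by omega), secondPass_eq]
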